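-- pv_equiv track=rewrite | github.com/Leornadia/alx-interview | 0x01-lockboxes/0-lockboxes.py | canUnlockAllBoxes
-- ===== SOURCE A (Python) =====
-- def canUnlockAllBoxes(boxes):
--     """
--     Determines if all boxes can be opened.
--
--     Args:
--         boxes: A list of integers representing the keys inside the boxes.
--
--     Returns:
--         True if all boxes can be opened, False otherwise.
--     """
--
--     n = len(boxes)
--     opened_boxes = set([0])
--     available_keys = set([0])
--
--     while len(available_keys) > 0:
--         key = available_keys.pop()
--         for box_num in range(n):
--             if box_num not in opened_boxes and boxes[box_num] == key:
--                 opened_boxes.add(box_num)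
--                 available_keys.add(box_num)
--
--     return len(opened_boxes) == n
-- ===== SOURCE B (Python) =====
-- def canUnlockAllBoxes(boxes):
--     # O(n): index box positions by the key value they hold, then DFS from box 0.
--     positions = {}
--     for i, v in enumerate(boxes):
--         positions.setdefault(v, []).append(i)
--     visited = {0}
--     stack = [0]
--     while stack:
--         key = stack.pop()
--         for i in positions.get(key, []):
--             if i not in visited:
--                 visited.add(i)
--                 stack.append(i)
--     return len(visited) == len(boxes)
-- ===== Notes on version B (the rewrite author's own statement) =====
-- stated objective: alternative
-- what changed: Replaces the rescan-all-boxes-per-popped-key worklist with a precomputed key-value-to-box-indices dict and a stack-based DFS over it, so each box is examined O(1) times after the one indexing pass.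
import Mathlib
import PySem

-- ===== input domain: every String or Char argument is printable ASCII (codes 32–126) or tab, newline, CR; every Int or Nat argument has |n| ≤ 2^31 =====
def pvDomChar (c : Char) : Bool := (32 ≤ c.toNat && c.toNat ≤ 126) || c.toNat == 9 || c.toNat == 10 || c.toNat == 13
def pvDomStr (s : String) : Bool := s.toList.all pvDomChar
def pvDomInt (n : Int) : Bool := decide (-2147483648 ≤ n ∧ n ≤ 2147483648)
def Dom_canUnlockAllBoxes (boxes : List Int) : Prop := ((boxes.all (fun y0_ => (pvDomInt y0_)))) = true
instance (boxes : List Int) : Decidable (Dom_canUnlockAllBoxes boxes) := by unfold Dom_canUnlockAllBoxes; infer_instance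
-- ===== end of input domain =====

-- B replaces A's rescan-all-boxes-per-popped-key worklist by a precomputed dict (key value → box
-- indices) plus a stack-based DFS over it; an alternative algorithm with the same return value.

-- ===== PORT A =====
-- inner 'for box_num in range(n)' body of A's while loop: state = (opened_boxes, available_keys)
def pvStepA (boxes : List Int) (key : Int) (st : PySem.Set Int × PySem.Set Int) (j : Nat) :
    PySem.Set Int × PySem.Set Int :=
  if (j : Int) ∉ st.1 ∧ PySem.List.pyGet? boxes (j : Int) = some key then
    (PySem.Set.add st.1 (j : Int), PySem.Set.add st.2 (j : Int))
  else st

-- A's 'while len(available_keys) > 0' loop; set.pop is modelled as taking the first element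
-- (the result only depends on the final set, which is pop-order independent).  The fuel
-- boxes.length + 1 bounds the number of pops (proved sufficient below); it only makes the
-- recursion structural, it never changes the computation.
def pvLoopA (boxes : List Int) : Nat → PySem.Set Int → PySem.Set Int → PySem.Set Int
  | 0, opened, _ => opened
  | fuel + 1, opened, avail =>
    match avail with
    | [] => opened
    | key :: rest =>
      let st := (List.range boxes.length).foldl (pvStepA boxes key) (opened, rest)
      pvLoopA boxes fuel st.1 st.2

def canUnlockAllBoxes (boxes : List Int) : Bool :=
  (pvLoopA boxes (boxes.length + 1) (PySem.Set.ofList [0]) (PySem.Set.ofList [0])).length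
    == boxes.length

-- ===== PORT B =====
-- 'positions.setdefault(v, []).append(i)' over 'for i, v in enumerate(boxes)':
-- positions[v] = positions.get(v, []) + [i]
def pvAdjB (boxes : List Int) : PySem.Dict Int (List Int) :=
  (PySem.List.enumerate boxes).foldl (fun d p => d.modify p.2 [] (· ++ [p.1])) PySem.Dict.empty

-- body of 'for i in positions.get(key, [])': state = (visited, stack)
def pvStepB (st : PySem.Set Int × List Int) (i : Int) : PySem.Set Int × List Int :=
  if i ∈ st.1 then st else (PySem.Set.add st.1 i, st.2 ++ [i])

-- 'while stack:' with 'key = stack.pop()' (pop from the end); fuel as in pvLoopA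
def pvLoopB (adj : PySem.Dict Int (List Int)) : Nat → PySem.Set Int → List Int → PySem.Set Int
  | 0, visited, _ => visited
  | fuel + 1, visited, stack =>
    if h : stack = [] then visited
    else
      let key := stack.getLast h
      let st := (adj.getD key []).foldl pvStepB (visited, stack.dropLast)
      pvLoopB adj fuel st.1 st.2

def canUnlockAllBoxes_alt (boxes : List Int) : Bool :=
  (pvLoopB (pvAdjB boxes) (boxes.length + 1) (PySem.Set.ofList [0]) [0]).length == boxes.length

-- ===== PRECONDITION & SPEC =====
def Spec_canUnlockAllBoxes (boxes : List Int) (out : Bool) : Prop := out = canUnlockAllBoxes_alt boxes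
instance (boxes : List Int) (out : Bool) : Decidable (Spec_canUnlockAllBoxes boxes out) := by unfold Spec_canUnlockAllBoxes; infer_instance

-- ===== CLAIM (what is proved, stated in full; the proofs are below) =====
def Claim_equal_canUnlockAllBoxes : Prop := ∀ (boxes : List Int), Dom_canUnlockAllBoxes boxes → Spec_canUnlockAllBoxes boxes (canUnlockAllBoxes boxes)

-- ===== LEMMAS AND PROOFS =====

-- x is a candidate unlocked by key k: x is a box index whose box holds key k
def pvCand (boxes : List Int) (k x : Int) : Prop :=
  ∃ j : Nat, x = (j : Int) ∧ boxes[j]? = some k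

-- the openable boxes: box 0, closed under "box holding a reachable index opens"
inductive pvReach (boxes : List Int) : Int → Prop
  | zero : pvReach boxes 0
  | step {k x : Int} : pvReach boxes k → pvCand boxes k x → pvReach boxes x

-- common worklist invariant: O = opened/visited, F = worklist
def pvInv (boxes : List Int) (O F : List Int) : Prop :=
  O.Nodup ∧ (0 : Int) ∈ O ∧ (∀ x ∈ F, x ∈ O) ∧ (∀ x ∈ O, pvReach boxes x) ∧
  (∀ x ∈ O, x = 0 ∨ ∃ j : Nat, j < boxes.length ∧ x = (j : Int)) ∧
  (∀ k x, k ∈ O → k ∉ F → pvCand boxes k x → x ∈ O)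

lemma pvO_length_le (boxes : List Int) (O : List Int) (hnd : O.Nodup)
    (hdom : ∀ x ∈ O, x = 0 ∨ ∃ j : Nat, j < boxes.length ∧ x = (j : Int)) :
    O.length ≤ boxes.length + 1 := by
  have hsub : O ⊆ (0 : Int) :: List.map Int.ofNat (List.range boxes.length) := by
    intro x hx
    rcases hdom x hx with h0 | ⟨j, hj, rfl⟩
    · simp [h0]
    · exact List.mem_cons.mpr (Or.inr (List.mem_map.mpr ⟨j, List.mem_range.mpr hj, rfl⟩))
  have := (hnd.subperm hsub).length_le
  simpa using this

lemma pvClosed_complete (boxes : List Int) (O : List Int) (h0 : (0 : Int) ∈ O)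
    (hcl : ∀ k x, k ∈ O → pvCand boxes k x → x ∈ O) :
    ∀ x, pvReach boxes x → x ∈ O := by
  intro x h
  induction h with
  | zero => exact h0
  | step hk hc ih => exact hcl _ _ ih hc

lemma pvCand_dom (boxes : List Int) (k x : Int) (h : pvCand boxes k x) :
    x = 0 ∨ ∃ j : Nat, j < boxes.length ∧ x = (j : Int) := by
  rcases h with ⟨j, rfl, hj⟩
  exact Or.inr ⟨j, (List.getElem?_eq_some_iff.mp hj).1, rfl⟩

-- effect of A's inner for-loop over an arbitrary index list
lemma pvInnerA_spec (boxes : List Int) (key : Int) :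
    ∀ (L : List Nat) (O F : List Int), O.Nodup → (∀ x ∈ F, x ∈ O) →
    (∀ x, x ∈ (L.foldl (pvStepA boxes key) (O, F)).1 ↔
        x ∈ O ∨ ∃ j ∈ L, x = (j : Int) ∧ boxes[j]? = some key) ∧
    (∀ x, x ∈ (L.foldl (pvStepA boxes key) (O, F)).2 ↔
        x ∈ F ∨ (x ∉ O ∧ ∃ j ∈ L, x = (j : Int) ∧ boxes[j]? = some key)) ∧
    (L.foldl (pvStepA boxes key) (O, F)).1.Nodup ∧
    (∀ x ∈ (L.foldl (pvStepA boxes key) (O, F)).2, x ∈ (L.foldl (pvStepA boxes key) (O, F)).1) ∧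
    (L.foldl (pvStepA boxes key) (O, F)).1.length + F.length
      = (L.foldl (pvStepA boxes key) (O, F)).2.length + O.length := by
  intro L
  induction L with
  | nil =>
    intro O F hnd hFO
    simp only [List.foldl_nil]
    exact ⟨fun x => by simp, fun x => by simp, hnd, hFO, by omega⟩
  | cons j L ih =>
    intro O F hnd hFO
    by_cases hg : (j : Int) ∉ O ∧ PySem.List.pyGet? boxes (j : Int) = some key
    · have hjO : (j : Int) ∉ O := hg.1
      have hjF : (j : Int) ∉ F := fun h => hjO (hFO _ h)
      have hget : boxes[j]? = some key := by
        simpa [PySem.List.pyGet?_natCast] using hg.2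
      have hstep : pvStepA boxes key (O, F) j
          = (O ++ [(j : Int)], F ++ [(j : Int)]) := by
        simp [pvStepA, hg, PySem.Set.add_of_not_mem, hjF]
      have hfold : (j :: L).foldl (pvStepA boxes key) (O, F)
          = L.foldl (pvStepA boxes key) (O ++ [(j : Int)], F ++ [(j : Int)]) := by
        rw [List.foldl_cons, hstep]
      have hnd' : (O ++ [(j : Int)]).Nodup := by
        simpa [List.nodup_append] using ⟨hnd, fun a ha h => hjO (h ▸ ha)⟩
      have hFO' : ∀ x ∈ F ++ [(j : Int)], x ∈ O ++ [(j : Int)] := by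
        intro x hx
        rcases List.mem_append.mp hx with hx | hx
        · exact List.mem_append.mpr (Or.inl (hFO x hx))
        · exact List.mem_append.mpr (Or.inr hx)
      obtain ⟨ihO, ihF, ihnd, ihsub, ihlen⟩ :=
        ih (O ++ [(j : Int)]) (F ++ [(j : Int)]) hnd' hFO'
      rw [hfold]
      refine ⟨?_, ?_, ihnd, ihsub, ?_⟩
      · intro x
        rw [ihO]
        simp only [List.mem_append, List.mem_cons, List.not_mem_nil, or_false,
          exists_eq_or_imp]
        constructor
        · rintro ((h | h) | h)
          · exact Or.inl h
          · exact Or.inr (Or.inl ⟨h, hget⟩)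
          · exact Or.inr (Or.inr h)
        · rintro (h | ⟨h, _⟩ | h)
          · exact Or.inl (Or.inl h)
          · exact Or.inl (Or.inr h)
          · exact Or.inr h
      · intro x
        rw [ihF]
        simp only [List.mem_append, List.mem_cons, List.not_mem_nil, or_false,
          exists_eq_or_imp, not_or]
        constructor
        · rintro ((h | h) | ⟨⟨hxO, hxj⟩, h⟩)
          · exact Or.inl h
          · subst h; exact Or.inr ⟨hjO, Or.inl ⟨rfl, hget⟩⟩
          · exact Or.inr ⟨hxO, Or.inr h⟩
        · rintro (h | ⟨hxO, (⟨rfl, _⟩ | h)⟩)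
          · exact Or.inl (Or.inl h)
          · exact Or.inl (Or.inr rfl)
          · by_cases hxj : x = (j : Int)
            · exact Or.inl (Or.inr hxj)
            · exact Or.inr ⟨⟨hxO, hxj⟩, h⟩
      · simp only [List.length_append, List.length_cons, List.length_nil] at ihlen ⊢
        omega
    · have hstep : pvStepA boxes key (O, F) j = (O, F) := by
        simp only [pvStepA, if_neg hg]
      have hfold : (j :: L).foldl (pvStepA boxes key) (O, F)
          = L.foldl (pvStepA boxes key) (O, F) := by
        rw [List.foldl_cons, hstep]
      obtain ⟨ihO, ihF, ihnd, ihsub, ihlen⟩ := ih O F hnd hFO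
      have hcase : ∀ x : Int, (x = (j : Int) ∧ boxes[j]? = some key) → x ∈ O := by
        rintro x ⟨rfl, hget⟩
        by_contra hxO
        exact hg ⟨hxO, by simpa [PySem.List.pyGet?_natCast] using hget⟩
      rw [hfold]
      refine ⟨?_, ?_, ihnd, ihsub, ihlen⟩
      · intro x
        rw [ihO]
        simp only [List.mem_cons, exists_eq_or_imp]
        constructor
        · rintro (h | h)
          · exact Or.inl h
          · exact Or.inr (Or.inr h)
        · rintro (h | h | h)
          · exact Or.inl h
          · exact Or.inl (hcase x h)
          · exact Or.inr h
      · intro x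
        rw [ihF]
        simp only [List.mem_cons, exists_eq_or_imp]
        constructor
        · rintro (h | ⟨hxO, h⟩)
          · exact Or.inl h
          · exact Or.inr ⟨hxO, Or.inr h⟩
        · rintro (h | ⟨hxO, (h | h)⟩)
          · exact Or.inl h
          · exact absurd (hcase x h) hxO
          · exact Or.inr ⟨hxO, h⟩

-- over the full index range, the added candidates are exactly pvCand boxes key
lemma pvRange_cand (boxes : List Int) (key x : Int) :
    (∃ j ∈ List.range boxes.length, x = (j : Int) ∧ boxes[j]? = some key)
      ↔ pvCand boxes key x := by
  constructor
  · rintro ⟨j, _, rfl, hj⟩; exact ⟨j, rfl, hj⟩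
  · rintro ⟨j, rfl, hj⟩
    exact ⟨j, List.mem_range.mpr (List.getElem?_eq_some_iff.mp hj).1, rfl, hj⟩

lemma pvLoopA_spec (boxes : List Int) :
    ∀ (fuel : Nat) (O F : List Int), pvInv boxes O F →
    F.length + boxes.length + 1 ≤ fuel + O.length →
    (pvLoopA boxes fuel O F).Nodup ∧
    (∀ x, x ∈ pvLoopA boxes fuel O F ↔ pvReach boxes x) := by
  intro fuel
  induction fuel with
  | zero =>
    intro O F hInv hfuel
    obtain ⟨hnd, h0, hFO, hsound, hdom, hcl⟩ := hInv
    have hlen := pvO_length_le boxes O hnd hdom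
    have hF : F = [] := List.length_eq_zero_iff.mp (by omega)
    subst hF
    refine ⟨hnd, fun x => ⟨hsound x, pvClosed_complete boxes O h0 (fun k x hk hc => hcl k x hk (by simp) hc) x⟩⟩
  | succ fuel ih =>
    intro O F hInv hfuel
    obtain ⟨hnd, h0, hFO, hsound, hdom, hcl⟩ := hInv
    match F with
    | [] =>
      refine ⟨hnd, fun x => ⟨hsound x, pvClosed_complete boxes O h0 (fun k x hk hc => hcl k x hk (by simp) hc) x⟩⟩
    | key :: rest =>
      have hrestO : ∀ x ∈ rest, x ∈ O := fun x hx => hFO x (List.mem_cons_of_mem _ hx)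
      obtain ⟨hO', hF', hnd', hsub', hlen'⟩ :=
        pvInnerA_spec boxes key (List.range boxes.length) O rest hnd hrestO
      set st := (List.range boxes.length).foldl (pvStepA boxes key) (O, rest) with hst
      simp only [pvRange_cand] at hO' hF'
      have hkeyO : key ∈ O := hFO key (List.mem_cons_self)
      have hkeyR : pvReach boxes key := hsound key hkeyO
      have hInv' : pvInv boxes st.1 st.2 := by
        refine ⟨hnd', (hO' 0).mpr (Or.inl h0), hsub', ?_, ?_, ?_⟩
        · intro x hx
          rcases (hO' x).mp hx with h | h
          · exact hsound x h
          · exact pvReach.step hkeyR h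
        · intro x hx
          rcases (hO' x).mp hx with h | h
          · exact hdom x h
          · exact pvCand_dom boxes key x h
        · intro k x hk hkF hc
          by_cases hkk : k = key
          · exact (hO' x).mpr (Or.inr (hkk ▸ hc))
          · rcases (hO' k).mp hk with hkO | hkC
            · have hkrest : k ∉ rest := fun h => hkF ((hF' k).mpr (Or.inl h))
              have : k ∉ key :: rest := by
                simp only [List.mem_cons]; rintro (h | h); exacts [hkk h, hkrest h]
              exact (hO' x).mpr (Or.inl (hcl k x hkO this hc))
            · by_cases hkO : k ∈ O
              · have hkrest : k ∉ rest := fun h => hkF ((hF' k).mpr (Or.inl h))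
                have : k ∉ key :: rest := by
                  simp only [List.mem_cons]; rintro (h | h); exacts [hkk h, hkrest h]
                exact (hO' x).mpr (Or.inl (hcl k x hkO this hc))
              · exact absurd ((hF' k).mpr (Or.inr ⟨hkO, hkC⟩)) hkF
      have hfuel' : st.2.length + boxes.length + 1 ≤ fuel + st.1.length := by
        simp only [List.length_cons] at hfuel
        omega
      have := ih st.1 st.2 hInv' hfuel'
      simpa only [pvLoopA] using this

-- B's adjacency dict: positions.get(k, []) holds exactly the indices of boxes holding k
lemma pvAdjB_getD (boxes : List Int) (k x : Int) :
    x ∈ (pvAdjB boxes).getD k [] ↔ pvCand boxes k x := by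
  have hswap : pvAdjB boxes
      = ((PySem.List.enumerate boxes).map (fun p => (p.2, p.1))).foldl
          (fun d p => d.modify p.1 [] (· ++ [p.2])) PySem.Dict.empty := by
    rw [List.foldl_map]
    rfl
  rw [hswap, PySem.Dict.getD_foldl_modify_append, PySem.Dict.getD_empty]
  simp only [List.nil_append, List.mem_map, List.mem_filter, PySem.List.mem_enumerate_iff,
    beq_iff_eq, pvCand]
  constructor
  · rintro ⟨p, ⟨⟨q, ⟨j, hj, rfl⟩, rfl⟩, hk⟩, rfl⟩
    refine ⟨j, by simp, ?_⟩
    rw [List.getElem?_eq_some_iff]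
    exact ⟨hj, by simpa using hk⟩
  · rintro ⟨j, rfl, hj⟩
    obtain ⟨hjlt, hval⟩ := List.getElem?_eq_some_iff.mp hj
    refine ⟨(boxes[j], (0 : Int) + (j : Int)), ⟨⟨((0 : Int) + (j : Int), boxes[j]),
      ⟨j, hjlt, rfl⟩, rfl⟩, hval⟩, by simp⟩

-- effect of B's inner for-loop over the adjacency list
lemma pvInnerB_spec :
    ∀ (L : List Int) (V S : List Int), V.Nodup → (∀ x ∈ S, x ∈ V) →
    (∀ x, x ∈ (L.foldl pvStepB (V, S)).1 ↔ x ∈ V ∨ x ∈ L) ∧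
    (∀ x, x ∈ (L.foldl pvStepB (V, S)).2 ↔ x ∈ S ∨ (x ∉ V ∧ x ∈ L)) ∧
    (L.foldl pvStepB (V, S)).1.Nodup ∧
    (∀ x ∈ (L.foldl pvStepB (V, S)).2, x ∈ (L.foldl pvStepB (V, S)).1) ∧
    (L.foldl pvStepB (V, S)).1.length + S.length
      = (L.foldl pvStepB (V, S)).2.length + V.length := by
  intro L
  induction L with
  | nil =>
    intro V S hnd hSV
    simp only [List.foldl_nil]
    exact ⟨fun x => by simp, fun x => by simp, hnd, hSV, by omega⟩
  | cons i L ih =>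
    intro V S hnd hSV
    by_cases hiV : i ∈ V
    · have hstep : pvStepB (V, S) i = (V, S) := by simp [pvStepB, hiV]
      have hfold : (i :: L).foldl pvStepB (V, S) = L.foldl pvStepB (V, S) := by
        rw [List.foldl_cons, hstep]
      obtain ⟨ihO, ihF, ihnd, ihsub, ihlen⟩ := ih V S hnd hSV
      rw [hfold]
      refine ⟨?_, ?_, ihnd, ihsub, ihlen⟩
      · intro x
        rw [ihO]
        simp only [List.mem_cons]
        constructor
        · rintro (h | h); exacts [Or.inl h, Or.inr (Or.inr h)]
        · rintro (h | h | h); exacts [Or.inl h, Or.inl (h ▸ hiV), Or.inr h]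
      · intro x
        rw [ihF]
        simp only [List.mem_cons]
        constructor
        · rintro (h | ⟨hxV, h⟩); exacts [Or.inl h, Or.inr ⟨hxV, Or.inr h⟩]
        · rintro (h | ⟨hxV, (h | h)⟩)
          · exact Or.inl h
          · exact absurd (h ▸ hiV) hxV
          · exact Or.inr ⟨hxV, h⟩
    · have hiS : i ∉ S := fun h => hiV (hSV _ h)
      have hstep : pvStepB (V, S) i = (V ++ [i], S ++ [i]) := by
        simp [pvStepB, hiV, PySem.Set.add_of_not_mem]
      have hfold : (i :: L).foldl pvStepB (V, S) = L.foldl pvStepB (V ++ [i], S ++ [i]) := by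
        rw [List.foldl_cons, hstep]
      have hnd' : (V ++ [i]).Nodup := by
        simpa [List.nodup_append] using ⟨hnd, fun a ha h => hiV (h ▸ ha)⟩
      have hSV' : ∀ x ∈ S ++ [i], x ∈ V ++ [i] := by
        intro x hx
        rcases List.mem_append.mp hx with hx | hx
        · exact List.mem_append.mpr (Or.inl (hSV x hx))
        · exact List.mem_append.mpr (Or.inr hx)
      obtain ⟨ihO, ihF, ihnd, ihsub, ihlen⟩ := ih (V ++ [i]) (S ++ [i]) hnd' hSV'
      rw [hfold]
      refine ⟨?_, ?_, ihnd, ihsub, ?_⟩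
      · intro x
        rw [ihO]
        simp only [List.mem_append, List.mem_cons, List.not_mem_nil, or_false]
        tauto
      · intro x
        rw [ihF]
        simp only [List.mem_append, List.mem_cons, List.not_mem_nil, or_false, not_or]
        constructor
        · rintro ((h | h) | ⟨⟨hxV, hxi⟩, h⟩)
          · exact Or.inl h
          · subst h; exact Or.inr ⟨hiV, Or.inl rfl⟩
          · exact Or.inr ⟨hxV, Or.inr h⟩
        · rintro (h | ⟨hxV, (h | h)⟩)
          · exact Or.inl (Or.inl h)
          · exact Or.inl (Or.inr h)
          · by_cases hxi : x = i
            · exact Or.inl (Or.inr hxi)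
            · exact Or.inr ⟨⟨hxV, hxi⟩, h⟩
      · simp only [List.length_append, List.length_cons, List.length_nil] at ihlen ⊢
        omega

lemma pvLoopB_spec (boxes : List Int) :
    ∀ (fuel : Nat) (V S : List Int), pvInv boxes V S →
    S.length + boxes.length + 1 ≤ fuel + V.length →
    (pvLoopB (pvAdjB boxes) fuel V S).Nodup ∧
    (∀ x, x ∈ pvLoopB (pvAdjB boxes) fuel V S ↔ pvReach boxes x) := by
  intro fuel
  induction fuel with
  | zero =>
    intro V S hInv hfuel
    obtain ⟨hnd, h0, hSV, hsound, hdom, hcl⟩ := hInv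
    have hlen := pvO_length_le boxes V hnd hdom
    have hS : S = [] := List.length_eq_zero_iff.mp (by omega)
    subst hS
    refine ⟨hnd, fun x => ⟨hsound x, pvClosed_complete boxes V h0 (fun k x hk hc => hcl k x hk (by simp) hc) x⟩⟩
  | succ fuel ih =>
    intro V S hInv hfuel
    obtain ⟨hnd, h0, hSV, hsound, hdom, hcl⟩ := hInv
    by_cases hS : S = []
    · subst hS
      have hred : pvLoopB (pvAdjB boxes) (fuel + 1) V [] = V := by
        simp [pvLoopB]
      rw [hred]
      exact ⟨hnd, fun x => ⟨hsound x, pvClosed_complete boxes V h0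
        (fun k x hk hc => hcl k x hk (by simp) hc) x⟩⟩
    · have hsplit : S.dropLast ++ [S.getLast hS] = S := List.dropLast_append_getLast hS
      set key := S.getLast hS with hkey
      set rest := S.dropLast with hrest
      have hmemS : ∀ x, x ∈ S ↔ x ∈ rest ∨ x = key := by
        intro x
        conv_lhs => rw [← hsplit]
        simp
      have hlenS : S.length = rest.length + 1 := by
        conv_lhs => rw [← hsplit]
        simp
      have hrestV : ∀ x ∈ rest, x ∈ V := fun x hx => hSV x ((hmemS x).mpr (Or.inl hx))
      obtain ⟨hO', hF', hnd', hsub', hlen'⟩ :=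
        pvInnerB_spec ((pvAdjB boxes).getD key []) V rest hnd hrestV
      set st := (((pvAdjB boxes).getD key []).foldl pvStepB (V, rest)) with hst
      simp only [pvAdjB_getD] at hO' hF'
      have hkeyV : key ∈ V := hSV key ((hmemS key).mpr (Or.inr rfl))
      have hkeyR : pvReach boxes key := hsound key hkeyV
      have hInv' : pvInv boxes st.1 st.2 := by
        refine ⟨hnd', (hO' 0).mpr (Or.inl h0), hsub', ?_, ?_, ?_⟩
        · intro x hx
          rcases (hO' x).mp hx with h | h
          · exact hsound x h
          · exact pvReach.step hkeyR h
        · intro x hx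
          rcases (hO' x).mp hx with h | h
          · exact hdom x h
          · exact pvCand_dom boxes key x h
        · intro k x hk hkF hc
          by_cases hkk : k = key
          · exact (hO' x).mpr (Or.inr (hkk ▸ hc))
          · rcases (hO' k).mp hk with hkV | hkC
            · have hkrest : k ∉ rest := fun h => hkF ((hF' k).mpr (Or.inl h))
              have : k ∉ S := fun h => by
                rcases (hmemS k).mp h with h | h; exacts [hkrest h, hkk h]
              exact (hO' x).mpr (Or.inl (hcl k x hkV this hc))
            · by_cases hkV : k ∈ V
              · have hkrest : k ∉ rest := fun h => hkF ((hF' k).mpr (Or.inl h))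
                have : k ∉ S := fun h => by
                  rcases (hmemS k).mp h with h | h; exacts [hkrest h, hkk h]
                exact (hO' x).mpr (Or.inl (hcl k x hkV this hc))
              · exact absurd ((hF' k).mpr (Or.inr ⟨hkV, hkC⟩)) hkF
      have hfuel' : st.2.length + boxes.length + 1 ≤ fuel + st.1.length := by
        omega
      have := ih st.1 st.2 hInv' hfuel'
      simpa only [pvLoopB, dif_neg hS] using this

lemma pvInit_inv (boxes : List Int) : pvInv boxes [0] [0] := by
  refine ⟨by simp, by simp, by simp, ?_, ?_, ?_⟩
  · intro x hx
    rw [List.mem_singleton.mp hx]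
    exact pvReach.zero
  · intro x hx
    exact Or.inl (List.mem_singleton.mp hx)
  · intro k x hk hkF
    exact absurd hk (by simpa using hkF)

-- ===== VERDICT (by name: the statement is the Claim_ definition above) =====
theorem canUnlockAllBoxes_spec : Claim_equal_canUnlockAllBoxes := by
  intro boxes _
  unfold Spec_canUnlockAllBoxes canUnlockAllBoxes canUnlockAllBoxes_alt
  have hset : PySem.Set.ofList ([0] : List Int) = [0] := rfl
  rw [hset]
  have hfuel : ([0] : List Int).length + boxes.length + 1 ≤ (boxes.length + 1) + ([0] : List Int).length := by
    simp only [List.length_cons, List.length_nil]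
    omega
  obtain ⟨hndA, hA⟩ := pvLoopA_spec boxes (boxes.length + 1) [0] [0] (pvInit_inv boxes) hfuel
  obtain ⟨hndB, hB⟩ := pvLoopB_spec boxes (boxes.length + 1) [0] [0] (pvInit_inv boxes) hfuel
  have hperm : List.Perm (pvLoopA boxes (boxes.length + 1) [0] [0])
      (pvLoopB (pvAdjB boxes) (boxes.length + 1) [0] [0]) := by
    rw [List.perm_ext_iff_of_nodup hndA hndB]
    intro a
    rw [hA a, hB a]
  rw [hperm.length_eq]
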